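-- pv_equiv track=rewrite | github.com/aryaman31/Connect4 | Connect 4.py | arrayWinn
-- ===== SOURCE A (Python) =====
-- def arrayWinn(array,peg,win):
--     for i in array:
--         c = 0
--         for j in i:
--             if j == peg:
--                 c = c + 1
--             else:
--                 c = 0
--
--             if c == 4 :
--                 win = True
--     return win
-- ===== SOURCE B (Python) =====
-- def _hasRun(row, peg):
--     # slide a window over suffixes: a win iff some suffix starts with four pegs
--     while row:
--         if row[:4] == [peg] * 4:
--             return True
--         row = row[1:]
--     return False
--
--
-- def arrayWinn(array, peg, win):
--     return win or any(_hasRun(row, peg) for row in array)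
-- ===== Notes on version B (the rewrite author's own statement) =====
-- stated objective: alternative
-- what changed: Replaces the stateful run counter threaded through nested loops by a sliding-window test: a row wins iff some suffix starts with four pegs, OR-ed into the incoming win.
import Mathlib
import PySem

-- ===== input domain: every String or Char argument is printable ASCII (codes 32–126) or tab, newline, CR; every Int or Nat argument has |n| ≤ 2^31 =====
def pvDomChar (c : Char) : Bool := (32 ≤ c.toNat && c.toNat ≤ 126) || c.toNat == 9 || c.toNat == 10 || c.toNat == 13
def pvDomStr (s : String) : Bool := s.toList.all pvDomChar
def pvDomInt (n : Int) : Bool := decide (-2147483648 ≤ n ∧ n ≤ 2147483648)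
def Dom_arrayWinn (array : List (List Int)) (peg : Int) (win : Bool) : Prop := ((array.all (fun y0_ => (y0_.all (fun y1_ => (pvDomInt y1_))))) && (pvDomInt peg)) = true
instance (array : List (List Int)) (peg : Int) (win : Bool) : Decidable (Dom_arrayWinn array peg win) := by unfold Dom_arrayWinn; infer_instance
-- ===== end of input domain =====

-- B replaces A's stateful run counter by a sliding-window test (a row wins iff some suffix starts with four pegs), OR-ed into the incoming win; alternative decomposition, same cost.


-- ===== PORT A =====
-- literal transliteration: outer loop over rows, inner loop threading (c, win)
def arrayWinn (array : List (List Int)) (peg : Int) (win : Bool) : Bool :=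
  array.foldl (fun win i =>
    (i.foldl (fun (s : Int × Bool) j =>
        let c : Int := if j = peg then s.1 + 1 else 0
        (c, if c = 4 then true else s.2)) ((0 : Int), win)).2) win

-- ===== PORT B =====
-- Source B's _hasRun: while row: if row[:4] == [peg]*4: return True; row = row[1:]
def hasRunB (peg : Int) : List Int → Bool
  | [] => false
  | j :: rest =>
    if (j :: rest).take 4 = List.replicate 4 peg then true else hasRunB peg rest

def arrayWinn_alt (array : List (List Int)) (peg : Int) (win : Bool) : Bool :=
  win || array.any (fun row => hasRunB peg row)

-- ===== PRECONDITION & SPEC =====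
def Spec_arrayWinn (array : List (List Int)) (peg : Int) (win : Bool) (out : Bool) : Prop := out = arrayWinn_alt array peg win
instance (array : List (List Int)) (peg : Int) (win : Bool) (out : Bool) : Decidable (Spec_arrayWinn array peg win out) := by unfold Spec_arrayWinn; infer_instance

-- ===== CLAIM (what is proved, stated in full; the proofs are below) =====
def Claim_equal_arrayWinn : Prop := ∀ (array : List (List Int)) (peg : Int) (win : Bool), Dom_arrayWinn array peg win → Spec_arrayWinn array peg win (arrayWinn array peg win)

-- ===== LEMMAS AND PROOFS =====

-- A's inner-loop step, named for the lemmas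
def stepA (peg : Int) (s : Int × Bool) (j : Int) : Int × Bool :=
  let c : Int := if j = peg then s.1 + 1 else 0
  (c, if c = 4 then true else s.2)

theorem arrayWinn_eq_foldl (array : List (List Int)) (peg : Int) (win : Bool) :
    arrayWinn array peg win
      = array.foldl (fun w i => (i.foldl (stepA peg) ((0 : Int), w)).2) win := rfl

-- Whether A's inner loop (started with counter n) ever reaches c = 4 on this row
def trig (peg : Int) : Nat → List Int → Bool
  | _, [] => false
  | n, j :: rest => if j = peg then (decide (n + 1 = 4) || trig peg (n + 1) rest) else trig peg 0 rest

theorem hasRunB_cons (peg j : Int) (rest : List Int) :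
    hasRunB peg (j :: rest)
      = (decide ((j :: rest).take 4 = List.replicate 4 peg) || hasRunB peg rest) := by
  rw [hasRunB]
  by_cases h : (j :: rest).take 4 = List.replicate 4 peg <;> simp [h]

theorem inner_foldl_eq (peg : Int) (row : List Int) :
    ∀ (n : Nat) (w : Bool),
      (row.foldl (stepA peg) ((n : Int), w)).2 = (w || trig peg n row) := by
  induction row with
  | nil => intro n w; simp [trig]
  | cons j rest ih =>
    intro n w
    by_cases hj : j = peg
    · have h0 : stepA peg ((n : Int), w) j
          = (((n + 1 : Nat) : Int), if n + 1 = 4 then true else w) := by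
        simp only [stepA, if_pos hj]
        refine Prod.ext ?_ ?_
        · push_cast; ring
        · by_cases h : n + 1 = 4
          · rw [if_pos h, if_pos (by push_cast; omega)]
          · rw [if_neg h, if_neg (by omega)]
      rw [List.foldl_cons, h0, ih]
      rw [trig, if_pos hj]
      by_cases h4 : n + 1 = 4 <;>
        simp [h4, Bool.or_comm, Bool.or_assoc, Bool.or_left_comm]
    · have h0 : stepA peg ((n : Int), w) j = (((0 : Nat) : Int), w) := by
        simp [stepA, hj]
      rw [List.foldl_cons, h0, ih]
      rw [trig, if_neg hj]

-- the head-window disjunct is absorbed by hasRunB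
theorem hasRunB_absorb (peg : Int) (row : List Int) :
    (decide (row.take 4 = List.replicate 4 peg) || hasRunB peg row) = hasRunB peg row := by
  cases row with
  | nil => simp [hasRunB, List.replicate_succ]
  | cons j rest =>
    rw [hasRunB_cons]
    by_cases h : (j :: rest).take 4 = List.replicate 4 peg <;> simp [h]

theorem trig_eq_hasRunB (peg : Int) (row : List Int) :
    ∀ n : Nat, n ≤ 3 →
      trig peg n row
        = (decide (row.take (4 - n) = List.replicate (4 - n) peg) || hasRunB peg row) := by
  induction row with
  | nil =>
    intro n hn
    have h1 : ¬ (List.take (4 - n) ([] : List Int) = List.replicate (4 - n) peg) := by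
      rw [show (4 - n) = (3 - n) + 1 by omega]
      simp [List.replicate_succ]
    simp [trig, hasRunB, h1]
    omega
  | cons j rest ih =>
    intro n hn
    by_cases hj : j = peg
    · subst hj
      rw [trig, if_pos rfl]
      by_cases h3 : n = 3
      · subst h3
        have hh : (j :: rest).take (4 - 3) = List.replicate (4 - 3) j := by
          simp [List.replicate_succ]
        simp [hh]
      · have hn' : n + 1 ≤ 3 := by omega
        have h44 : ¬ (n + 1 = 4) := by omega
        rw [decide_eq_false h44, Bool.false_or, ih (n + 1) hn', hasRunB_cons]
        have h2 : 4 - (n + 1) = 3 - n := by omega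
        have e1 : ((j :: rest).take (4 - n) = List.replicate (4 - n) j)
            ↔ (rest.take (3 - n) = List.replicate (3 - n) j) := by
          rw [show (4 - n) = (3 - n) + 1 by omega]
          simp [List.take_succ_cons, List.replicate_succ]
        rw [h2]
        by_cases hw : (j :: rest).take 4 = List.replicate 4 j
        · have ht3 : rest.take 3 = List.replicate 3 j := by
            have := hw
            rw [show (4 : Nat) = 3 + 1 from rfl] at this
            simpa [List.take_succ_cons, List.replicate_succ] using this
          have hX : rest.take (3 - n) = List.replicate (3 - n) j := by
            calc rest.take (3 - n) = (rest.take 3).take (3 - n) := by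
                  rw [List.take_take, Nat.min_eq_left (by omega)]
              _ = List.replicate (3 - n) j := by
                  rw [ht3, List.take_replicate, Nat.min_eq_left (by omega)]
          simp [hX, hw, e1]
        · have hY : ¬ (rest.take 3 = [j, j, j]) := by
            intro h
            exact hw (by rw [show (4 : Nat) = 3 + 1 from rfl]
                         simp [List.take_succ_cons, List.replicate_succ, h])
          simp [e1, hY]
    · rw [trig, if_neg hj, ih 0 (by omega)]
      have hhead : ¬ ((j :: rest).take (4 - n) = List.replicate (4 - n) peg) := by
        rw [show (4 - n) = (3 - n) + 1 by omega]
        simp [List.take_succ_cons, List.replicate_succ]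
        intro h; exact absurd h hj
      have hw : ¬ ((j :: rest).take 4 = List.replicate 4 peg) := by
        rw [show (4 : Nat) = 3 + 1 from rfl]
        simp [List.take_succ_cons, List.replicate_succ]
        intro h; exact absurd h hj
      rw [hasRunB_cons, decide_eq_false hhead, decide_eq_false hw, Bool.false_or, Bool.false_or]
      rw [show (4 - (0 : Nat)) = 4 from rfl]
      exact hasRunB_absorb peg rest

theorem trig_zero (peg : Int) (row : List Int) :
    trig peg 0 row = hasRunB peg row := by
  rw [trig_eq_hasRunB peg row 0 (by omega)]
  exact hasRunB_absorb peg row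

theorem outer_foldl (peg : Int) (array : List (List Int)) :
    ∀ w : Bool,
      array.foldl (fun w row => (w || hasRunB peg row)) w
        = (w || array.any (fun row => hasRunB peg row)) := by
  induction array with
  | nil => intro w; simp
  | cons i rest ih =>
    intro w
    simp only [List.foldl_cons, List.any_cons, ih, Bool.or_assoc]

-- ===== VERDICT (by name: the statement is the Claim_ definition above) =====
theorem arrayWinn_spec : Claim_equal_arrayWinn := by
  intro array peg win _
  unfold Spec_arrayWinn arrayWinn_alt
  rw [arrayWinn_eq_foldl]
  have hrow : (fun (w : Bool) (i : List Int) => ((i.foldl (stepA peg) ((0 : Int), w)).2))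
      = fun w row => (w || hasRunB peg row) := by
    funext w row
    rw [show ((0 : Int), w) = (((0 : Nat) : Int), w) from rfl, inner_foldl_eq, trig_zero]
  rw [hrow, outer_foldl]
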